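-- pv_equiv track=rewrite | github.com/mariajuliaquilis/IP-AED1 | Guias/Guia 6/guia6.py | peso_pino
-- ===== SOURCE A (Python) =====
-- def peso_pino(altura: int)-> int:
--     peso_kg = 0
--     for num in range(1, altura+1, 1):
--         if num <= 3:
--             peso_kg = num*100*3
--         else:
--             primeros_tres_metros = 3
--             diferencia = (altura-primeros_tres_metros)
--             peso_kg = primeros_tres_metros*100*3 + diferencia*100*2
--     return peso_kg
-- ===== SOURCE B (Python) =====
-- def peso_pino(altura: int) -> int:
--     if altura <= 0:
--         return 0
--     if altura <= 3:
--         return altura * 300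
--     return 900 + (altura - 3) * 200
-- ===== Notes on version B (the rewrite author's own statement) =====
-- stated objective: faster
-- what changed: Replaced the loop over range(1, altura+1) (whose body overwrites peso_kg each iteration, so only the last iteration matters) with the closed-form branch: 0 for altura<=0, altura*300 for altura<=3, else 900+(altura-3)*200.
import Mathlib
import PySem

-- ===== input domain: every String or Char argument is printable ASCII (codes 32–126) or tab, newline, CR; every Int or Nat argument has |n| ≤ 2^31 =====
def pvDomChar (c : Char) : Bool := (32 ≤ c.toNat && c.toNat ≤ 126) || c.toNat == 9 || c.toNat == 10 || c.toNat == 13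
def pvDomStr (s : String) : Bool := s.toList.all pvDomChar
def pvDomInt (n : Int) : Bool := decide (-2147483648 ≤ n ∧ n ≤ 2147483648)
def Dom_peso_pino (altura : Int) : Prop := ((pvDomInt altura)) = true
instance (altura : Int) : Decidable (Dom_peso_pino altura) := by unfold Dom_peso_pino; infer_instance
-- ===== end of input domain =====

-- B replaces A's loop (each iteration overwrites peso_kg, so only the last one matters)
-- by the equivalent closed-form branch; objective: faster (O(1) vs O(n)).

-- ===== PORT A =====
def peso_pino (altura : Int) : Int :=
  (PySem.List.pyRange 1 (altura + 1) 1).foldl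
    (fun _peso_kg num =>
      if num ≤ 3 then
        num * 100 * 3
      else
        let primeros_tres_metros : Int := 3
        let diferencia := altura - primeros_tres_metros
        primeros_tres_metros * 100 * 3 + diferencia * 100 * 2)
    0

-- ===== PORT B =====
def peso_pino_alt (altura : Int) : Int :=
  if altura ≤ 0 then 0
  else if altura ≤ 3 then altura * 300
  else 900 + (altura - 3) * 200

-- ===== PRECONDITION & SPEC =====
def Spec_peso_pino (altura : Int) (out : Int) : Prop := out = peso_pino_alt altura
instance (altura : Int) (out : Int) : Decidable (Spec_peso_pino altura out) := by unfold Spec_peso_pino; infer_instance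

-- ===== CLAIM (what is proved, stated in full; the proofs are below) =====
def Claim_equal_peso_pino : Prop := ∀ (altura : Int), Dom_peso_pino altura → Spec_peso_pino altura (peso_pino altura)

-- ===== LEMMAS AND PROOFS =====

-- ===== VERDICT (by name: the statement is the Claim_ definition above) =====
theorem peso_pino_spec : Claim_equal_peso_pino := by
  intro altura _
  unfold Spec_peso_pino peso_pino peso_pino_alt
  by_cases h0 : altura ≤ 0
  · rw [PySem.List.pyRange_one_eq_nil (by omega)]
    simp [h0]
  · rw [show altura + 1 = altura + 1 from rfl,
        PySem.List.pyRange_one_succ_right (by omega : (1:Int) ≤ altura)]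
    rw [List.foldl_append]
    simp only [List.foldl]
    by_cases h3 : altura ≤ 3 <;> simp [h0, h3] <;> ring
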